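-- pv_equiv track=rewrite | github.com/juliaaro/Estudo_Python | lab14.py | busca_palavra
-- ===== SOURCE A (Python) =====
-- def busca_palavra(matriz, linha, coluna, palavra):
--   if len(palavra) == 0:
--     return True
--   for i in range(-1,2,1):
--     for j in range(-1,2,1):
--       if (linha + i < len(matriz)) and (coluna + j < len(matriz[0])) and linha + i >= 0 and coluna + j >= 0:
--         if matriz[linha+i][coluna+j] == palavra[0]:
--           if busca_palavra(matriz, linha + i, coluna + j, palavra[1:]) == True:
--             return True
--   return False
-- ===== SOURCE B (Python) =====
-- def busca_palavra(matriz, linha, coluna, palavra):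
--     # Layered DP: for each character keep the list of cells where a prefix of
--     # palavra can end, instead of 9-way recursive backtracking.
--     rows = len(matriz)
--     cols = len(matriz[0]) if matriz else 0
--     prev = [(linha, coluna)]
--     for ch in palavra:
--         prev = [(r, c)
--                 for r in range(rows) for c in range(cols)
--                 if matriz[r][c] == ch
--                 and any(abs(r - pr) <= 1 and abs(c - pc) <= 1 for (pr, pc) in prev)]
--         if not prev:
--             return False
--     return True
-- ===== Notes on version B (the rewrite author's own statement) =====
-- stated objective: alternative
-- what changed: Replaces A's 9-way recursive backtracking with a per-character layered DP that keeps the list of grid cells where each prefix of palavra can end.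
-- outside the precondition, e.g. on busca_palavra([['a', 'b'], ['a']], 0, 0, 'b'): A returns True, B raises IndexError; on busca_palavra([], 0, 0, 'a'): A raises IndexError, B returns False
import Mathlib
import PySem

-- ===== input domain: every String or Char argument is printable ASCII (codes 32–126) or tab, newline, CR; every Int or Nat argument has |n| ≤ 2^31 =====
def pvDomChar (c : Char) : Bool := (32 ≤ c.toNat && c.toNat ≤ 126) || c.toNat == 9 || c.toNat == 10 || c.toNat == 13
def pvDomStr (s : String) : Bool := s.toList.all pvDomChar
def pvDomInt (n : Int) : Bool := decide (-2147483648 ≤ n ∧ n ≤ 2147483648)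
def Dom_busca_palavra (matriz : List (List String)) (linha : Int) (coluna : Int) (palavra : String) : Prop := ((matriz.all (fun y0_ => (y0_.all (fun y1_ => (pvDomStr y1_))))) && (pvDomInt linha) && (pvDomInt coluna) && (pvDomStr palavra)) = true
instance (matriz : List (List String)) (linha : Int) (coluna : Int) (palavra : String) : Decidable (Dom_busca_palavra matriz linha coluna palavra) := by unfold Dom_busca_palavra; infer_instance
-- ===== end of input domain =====

-- B replaces A's 9-way recursive backtracking by a per-character layered reachable-cell DP (alternative algorithm, same proved return value).

-- cell value matriz[r][c] (total form; both guards ensure in-range access)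
def pvCell (matriz : List (List String)) (r c : Int) : String :=
  (PySem.List.pyGet? ((PySem.List.pyGet? matriz r).getD []) c).getD ""

-- ===== PORT A =====
def buscaA (matriz : List (List String)) (linha coluna : Int) (palavra : List Char) : Bool :=
  match palavra with
  | [] => true
  | ch :: rest =>
    (PySem.List.pyRange (-1) 2 1).any fun i =>
      (PySem.List.pyRange (-1) 2 1).any fun j =>
        if linha + i < (matriz.length : Int) ∧ coluna + j < ((matriz.headD []).length : Int) ∧ 0 ≤ linha + i ∧ 0 ≤ coluna + j then
          if pvCell matriz (linha + i) (coluna + j) == String.mk [ch] then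
            buscaA matriz (linha + i) (coluna + j) rest
          else false
        else false

def busca_palavra (matriz : List (List String)) (linha : Int) (coluna : Int) (palavra : String) : Bool :=
  buscaA matriz linha coluna palavra.toList

-- ===== PORT B =====
def buscaBStep (matriz : List (List String)) (rows cols : Int) (prev : List (Int × Int)) (ch : Char) : List (Int × Int) :=
  (PySem.List.pyRange 0 rows 1).flatMap fun r =>
    ((PySem.List.pyRange 0 cols 1).filter fun c =>
        (pvCell matriz r c == String.mk [ch])
        && prev.any fun p => decide (|r - p.1| ≤ 1 ∧ |c - p.2| ≤ 1)).map fun c => (r, c)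

def buscaB (matriz : List (List String)) (rows cols : Int) (prev : List (Int × Int)) (palavra : List Char) : Bool :=
  match palavra with
  | [] => true
  | ch :: rest =>
    let nxt := buscaBStep matriz rows cols prev ch
    if nxt = [] then false else buscaB matriz rows cols nxt rest

def busca_palavra_alt (matriz : List (List String)) (linha : Int) (coluna : Int) (palavra : String) : Bool :=
  let rows : Int := matriz.length
  let cols : Int := match matriz with | [] => 0 | r :: _ => (r.length : Int)
  buscaB matriz rows cols [(linha, coluna)] palavra.toList

-- ===== PRECONDITION & SPEC =====
-- Pre_ excludes (a) matrices with a row shorter than row 0 when palavra is nonempty — A's bound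
-- check uses row 0's length for every row, so Python A raises IndexError when its walk reaches such
-- a row (and may accidentally return before reaching it), while B's layered scan raises IndexError
-- there; (b) the empty matrix with a nonempty word and linha ≤ 0, where Python A raises IndexError
-- evaluating len(matriz[0]).
def Pre_busca_palavra (matriz : List (List String)) (linha : Int) (coluna : Int) (palavra : String) : Prop :=
  (palavra = "" ∨ ∀ row ∈ matriz, (matriz.headD []).length ≤ row.length) ∧
  (matriz = [] → palavra = "" ∨ 1 ≤ linha)

instance (matriz : List (List String)) (linha : Int) (coluna : Int) (palavra : String) : Decidable (Pre_busca_palavra matriz linha coluna palavra) := by unfold Pre_busca_palavra; infer_instance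

def pvWitness_busca_palavra : List (List String) × Int × Int × String :=
  ([["a", "b"], ["c", "a"]], 0, 0, "ab")

def Spec_busca_palavra (matriz : List (List String)) (linha : Int) (coluna : Int) (palavra : String) (out : Bool) : Prop := out = busca_palavra_alt matriz linha coluna palavra
instance (matriz : List (List String)) (linha : Int) (coluna : Int) (palavra : String) (out : Bool) : Decidable (Spec_busca_palavra matriz linha coluna palavra out) := by unfold Spec_busca_palavra; infer_instance

-- ===== CLAIM (what is proved, stated in full; the proofs are below) =====
def Claim_equal_busca_palavra : Prop := ∀ (matriz : List (List String)) (linha : Int) (coluna : Int) (palavra : String), Dom_busca_palavra matriz linha coluna palavra → Pre_busca_palavra matriz linha coluna palavra → Spec_busca_palavra matriz linha coluna palavra (busca_palavra matriz linha coluna palavra)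


-- ===== LEMMAS AND PROOFS =====

theorem mem_buscaBStep (matriz : List (List String)) (rows cols : Int) (prev : List (Int × Int)) (ch : Char) (n : Int × Int) :
    n ∈ buscaBStep matriz rows cols prev ch ↔
      0 ≤ n.1 ∧ n.1 < rows ∧ 0 ≤ n.2 ∧ n.2 < cols ∧
      pvCell matriz n.1 n.2 = String.mk [ch] ∧
      ∃ p, p ∈ prev ∧ -1 ≤ n.1 - p.1 ∧ n.1 - p.1 ≤ 1 ∧ -1 ≤ n.2 - p.2 ∧ n.2 - p.2 ≤ 1 := by
  obtain ⟨a, b⟩ := n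
  simp only [buscaBStep, List.mem_flatMap, List.mem_map, List.mem_filter,
    PySem.List.mem_pyRange_one, Bool.and_eq_true, beq_iff_eq, List.any_eq_true,
    decide_eq_true_eq, abs_le, Prod.mk.injEq]
  constructor
  · rintro ⟨r, ⟨hr0, hr1⟩, c, ⟨⟨hc0, hc1⟩, hm, p, hp, ⟨hd1, hd2⟩, hd3, hd4⟩, he1, he2⟩
    subst he1; subst he2
    exact ⟨hr0, hr1, hc0, hc1, hm, p, hp, hd1, hd2, hd3, hd4⟩
  · rintro ⟨h1, h2, h3, h4, hm, p, hp, hd1, hd2, hd3, hd4⟩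
    exact ⟨a, ⟨h1, h2⟩, b, ⟨⟨h3, h4⟩, hm, p, hp, ⟨hd1, hd2⟩, hd3, hd4⟩, rfl, rfl⟩

theorem buscaA_cons_iff (matriz : List (List String)) (l c : Int) (ch : Char) (rest : List Char) :
    buscaA matriz l c (ch :: rest) = true ↔
      ∃ i, (-1 ≤ i ∧ i ≤ 1) ∧ ∃ j, (-1 ≤ j ∧ j ≤ 1) ∧
        (l + i < (matriz.length : Int) ∧ c + j < ((matriz.headD []).length : Int) ∧ 0 ≤ l + i ∧ 0 ≤ c + j) ∧
        pvCell matriz (l + i) (c + j) = String.mk [ch] ∧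
        buscaA matriz (l + i) (c + j) rest = true := by
  rw [buscaA]
  simp only [List.any_eq_true, PySem.List.mem_pyRange_one, beq_iff_eq,
    List.headD_eq_head?_getD]
  constructor
  · rintro ⟨i, ⟨hi0, hi1⟩, j, ⟨hj0, hj1⟩, h⟩
    by_cases hg : l + i < (matriz.length : Int) ∧ c + j < ((matriz.head?.getD []).length : Int) ∧ 0 ≤ l + i ∧ 0 ≤ c + j
    · rw [if_pos hg] at h
      by_cases hm : pvCell matriz (l + i) (c + j) = String.mk [ch]
      · rw [if_pos hm] at h
        exact ⟨i, ⟨hi0, by omega⟩, j, ⟨hj0, by omega⟩, hg, hm, h⟩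
      · rw [if_neg hm] at h; exact absurd h (by simp)
    · rw [if_neg hg] at h; exact absurd h (by simp)
  · rintro ⟨i, ⟨hi0, hi1⟩, j, ⟨hj0, hj1⟩, hg, hm, h⟩
    refine ⟨i, ⟨hi0, by omega⟩, j, ⟨hj0, by omega⟩, ?_⟩
    rw [if_pos hg, if_pos hm]; exact h

theorem buscaB_eq_any (matriz : List (List String)) (palavra : List Char) :
    ∀ prev : List (Int × Int), prev ≠ [] →
      buscaB matriz (matriz.length : Int) ((matriz.headD []).length : Int) prev palavra
        = prev.any (fun p => buscaA matriz p.1 p.2 palavra) := by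
  induction palavra with
  | nil =>
    intro prev hne
    rw [buscaB]
    cases prev with
    | nil => exact absurd rfl hne
    | cons p ps => simp [buscaA]
  | cons ch rest ih =>
    intro prev hne
    rw [buscaB]
    rw [Bool.eq_iff_iff]
    set nxt := buscaBStep matriz (matriz.length : Int) ((matriz.headD []).length : Int) prev ch with hnxt
    constructor
    · intro h
      by_cases hn : nxt = []
      · rw [if_pos hn] at h; exact absurd h (by simp)
      · rw [if_neg hn, ih nxt hn, List.any_eq_true] at h
        obtain ⟨n, hmem, hb⟩ := h
        rw [hnxt, mem_buscaBStep] at hmem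
        obtain ⟨h1, h2, h3, h4, hm, p, hp, hd1, hd2, hd3, hd4⟩ := hmem
        rw [List.any_eq_true]
        refine ⟨p, hp, ?_⟩
        rw [buscaA_cons_iff]
        have e1 : p.1 + (n.1 - p.1) = n.1 := by omega
        have e2 : p.2 + (n.2 - p.2) = n.2 := by omega
        refine ⟨n.1 - p.1, ⟨by omega, by omega⟩, n.2 - p.2, ⟨by omega, by omega⟩,
          ⟨by omega, by omega, by omega, by omega⟩, ?_, ?_⟩
        · rw [e1, e2]; exact hm
        · rw [e1, e2]; exact hb
    · intro h
      rw [List.any_eq_true] at h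
      obtain ⟨p, hp, hA⟩ := h
      rw [buscaA_cons_iff] at hA
      obtain ⟨i, ⟨hi0, hi1⟩, j, ⟨hj0, hj1⟩, ⟨hg1, hg2, hg3, hg4⟩, hm, hb⟩ := hA
      have hmem : (p.1 + i, p.2 + j) ∈ nxt := by
        rw [hnxt, mem_buscaBStep]
        exact ⟨hg3, hg1, hg4, hg2, hm, p, hp, by omega, by omega, by omega, by omega⟩
      have hn : nxt ≠ [] := by intro hc; rw [hc] at hmem; exact absurd hmem (List.not_mem_nil)
      rw [if_neg hn, ih nxt hn, List.any_eq_true]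
      exact ⟨(p.1 + i, p.2 + j), hmem, hb⟩

theorem cols_eq (matriz : List (List String)) :
    (match matriz with | [] => (0 : Int) | r :: _ => (r.length : Int)) = ((matriz.headD []).length : Int) := by
  cases matriz <;> simp

-- ===== VERDICT (by name: the statement is the Claim_ definition above) =====
theorem busca_palavra_spec : Claim_equal_busca_palavra := by
  intro matriz linha coluna palavra _ _
  unfold Spec_busca_palavra busca_palavra busca_palavra_alt
  rw [cols_eq, buscaB_eq_any matriz palavra.toList [(linha, coluna)] (by simp)]
  simp
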